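-- pv_equiv track=rewrite | github.com/mahwin/coding_test | 프로그래머스/행렬과연산.py | solution
-- ===== SOURCE A (Python) =====
-- from collections import deque
--
-- def solution(rc, operations):
--     R,C = len(rc), len(rc[0])
--
--     left,right,middle = deque(), deque(), deque()
--
--     for r in range(R):
--         left.append(rc[r][0])
--         right.append(rc[r][-1])
--         middle.append(deque(rc[r][1:C-1]))
--
--
--     for operation in operations:
--         if operation == 'ShiftRow':
--             left.appendleft(left.pop())
--             right.appendleft(right.pop())
--             middle.appendleft(middle.pop())
--         elif C >= 3:
--             middle_top = middle.popleft()
--             middle_bottom = middle.pop()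
--             right.appendleft(middle_top.pop())
--             middle_bottom.append(right.pop())
--             left.append(middle_bottom.popleft())
--             middle_top.appendleft(left.popleft())
--             middle.appendleft(middle_top)
--             middle.append(middle_bottom)
--         else :
--             right.appendleft(left.popleft())
--             left.append(right.pop())
--
--     for r in range(R):
--         rc[r] = [left.popleft(), *list(middle.popleft()), right.popleft()]
--     return rc
-- ===== SOURCE B (Python) =====
-- def solution(rc, operations):
--     R, C = len(rc), len(rc[0])
--     for op in operations:
--         if op == 'ShiftRow':
--             rc.insert(0, rc.pop())
--         else:
--             new = [row[:] for row in rc]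
--             new[0][1:] = rc[0][:C - 1]              # top row shifts right
--             for i in range(1, R):                   # right column shifts down
--                 new[i][C - 1] = rc[i - 1][C - 1]
--             new[R - 1][:C - 1] = rc[R - 1][1:C]     # bottom row shifts left
--             for i in range(R - 1):                  # left column shifts up
--                 new[i][0] = rc[i + 1][0]
--             rc[:] = new
--     return rc
-- ===== Notes on version B (the rewrite author's own statement) =====
-- stated objective: simpler
-- what changed: B keeps the matrix as a plain list of rows and performs each operation directly on it (row rotation by pop/insert, boundary rotation by four border edits reading from the old matrix), instead of A's decomposition into three deques (left column, right column, middle rows) with an eight-step pop/append shuffle and a final reassembly.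
-- intended difference: On rectangular single-column matrices (C == 1, outside the original problem's guaranteed shape C >= 2) A returns rows widened to length 2 because its separate left/right column deques both hold the lone column (e.g. [[1],[2]] with ['Rotate'] gives [[2,1],[2,1]]), while B's border rotation keeps every row at its original length 1 (returning [[2],[1]]); preserving the matrix shape is the intended behaviour. — e.g. on solution([[1], [2]], ["Rotate"]): A returns [[2, 1], [2, 1]], B returns [[2], [1]]
-- outside the precondition, e.g. on solution([[1], [2, 3]], []): A returns [[1, 1], [2, 3]], B returns [[1], [2, 3]]
import Mathlib
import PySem

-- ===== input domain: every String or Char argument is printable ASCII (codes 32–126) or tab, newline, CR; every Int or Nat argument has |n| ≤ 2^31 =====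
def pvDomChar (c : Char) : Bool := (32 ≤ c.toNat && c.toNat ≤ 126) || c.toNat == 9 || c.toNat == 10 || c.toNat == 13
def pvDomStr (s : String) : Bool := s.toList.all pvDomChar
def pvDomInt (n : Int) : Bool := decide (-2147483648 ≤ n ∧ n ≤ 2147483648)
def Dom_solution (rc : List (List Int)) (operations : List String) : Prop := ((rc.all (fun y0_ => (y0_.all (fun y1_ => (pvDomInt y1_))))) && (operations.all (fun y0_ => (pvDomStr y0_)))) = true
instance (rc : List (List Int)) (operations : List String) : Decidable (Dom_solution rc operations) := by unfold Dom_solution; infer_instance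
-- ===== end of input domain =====

-- B keeps the matrix as a plain list of rows and edits it directly (simpler); A splits it into three deques.
-- Both Pythons mutate rc in place; the equivalence proved here is about the return value.

-- ===== PORT A =====
-- deque pop (last) / popleft (first); Python raises on an empty deque — these return a default
-- there, which only happens outside Pre_solution.
def dqPop {α : Type} [Inhabited α] (l : List α) : α × List α := (l.getLastD default, l.dropLast)
def dqPopL {α : Type} [Inhabited α] (l : List α) : α × List α := (l.headD default, l.tail)

-- one operation on A's state (left, right, middle), mirroring A's loop body
def stepA (C : Nat) (st : List Int × List Int × List (List Int)) (op : String) :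
    List Int × List Int × List (List Int) :=
  let (left, right, middle) := st
  if op = "ShiftRow" then
    let (x, left') := dqPop left
    let (y, right') := dqPop right
    let (z, middle') := dqPop middle
    (x :: left', y :: right', z :: middle')
  else if 3 ≤ C then
    let (middle_top, middle1) := dqPopL middle
    let (middle_bottom, middle2) := dqPop middle1
    let (a, middle_top1) := dqPop middle_top
    let right1 := a :: right
    let (b, right2) := dqPop right1
    let middle_bottom1 := middle_bottom ++ [b]
    let (c, middle_bottom2) := dqPopL middle_bottom1
    let left1 := left ++ [c]
    let (d, left2) := dqPopL left1
    let middle_top2 := d :: middle_top1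
    (left2, right2, middle_top2 :: middle2 ++ [middle_bottom2])
  else
    let (a, left1) := dqPopL left
    let right1 := a :: right
    let (b, right2) := dqPop right1
    (left1 ++ [b], right2, middle)

-- final loop: rc[r] = [left.popleft(), *middle.popleft(), right.popleft()] for r in range(R)
def rebuildA : Nat → List Int → List (List Int) → List Int → List (List Int)
  | 0, _, _, _ => []
  | n + 1, l, mid, r =>
      (l.headD 0 :: (mid.headD [] ++ [r.headD 0])) :: rebuildA n l.tail mid.tail r.tail

def solution (rc : List (List Int)) (operations : List String) : List (List Int) :=
  let R := rc.length
  let C := (rc.headD []).length          -- len(rc[0]); Python raises on rc = [] (outside Pre_)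
  -- the building loop: left.append(rc[r][0]); right.append(rc[r][-1]); middle.append(deque(rc[r][1:C-1]))
  -- (rc[r][1:C-1] = (drop 1).take (C-2) since C : Nat; rc[r][0]/rc[r][-1] raise on an empty row, outside Pre_)
  let st := rc.foldl
    (fun (st : List Int × List Int × List (List Int)) row =>
      (st.1 ++ [row.headD 0], st.2.1 ++ [row.getLastD 0], st.2.2 ++ [(row.drop 1).take (C - 2)]))
    ([], [], [])
  let st2 := operations.foldl (stepA C) st   -- (left, right, middle) after all operations
  rebuildA R st2.1 st2.2.2 st2.2.1

-- ===== PORT B =====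
-- one operation on the matrix itself, mirroring Source B's loop body
def stepB (R C : Nat) (m : List (List Int)) (op : String) : List (List Int) :=
  if op = "ShiftRow" then
    -- rc.insert(0, rc.pop())
    m.getLastD [] :: m.dropLast
  else
    -- new = [row[:] for row in rc]; four border edits reading from the old matrix m
    let new1 := m.modify 0 (fun row => row.take 1 ++ (m.headD []).take (C - 1))         -- new[0][1:] = rc[0][:C-1]
    let new2 := (List.range' 1 (R - 1)).foldl
      (fun acc i => acc.modify i (fun row => row.set (C - 1) ((m.getD (i - 1) []).getD (C - 1) 0))) new1
                                                                                        -- new[i][C-1] = rc[i-1][C-1]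
    let new3 := new2.modify (R - 1) (fun row => ((m.getD (R - 1) []).drop 1).take (C - 1) ++ row.drop (C - 1))
                                                                                        -- new[R-1][:C-1] = rc[R-1][1:C]
    let new4 := (List.range (R - 1)).foldl
      (fun acc i => acc.modify i (fun row => row.set 0 ((m.getD (i + 1) []).getD 0 0))) new3
                                                                                        -- new[i][0] = rc[i+1][0]
    new4

def solution_alt (rc : List (List Int)) (operations : List String) : List (List Int) :=
  let R := rc.length
  let C := (rc.headD []).length
  operations.foldl (stepB R C) rc

-- ===== PRECONDITION & SPEC =====
-- Pre_ excludes: rc = [] and one-row matrices with C ≥ 3 given a rotation (A raises IndexError there),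
-- and non-rectangular rc, on which A silently reshapes the rows through its column-deque representation
-- (see the cite in the claim) — a representation artifact no row-based implementation reproduces.
def Pre_solution (rc : List (List Int)) (operations : List String) : Prop :=
  rc ≠ [] ∧ 1 ≤ (rc.headD []).length ∧ (∀ row ∈ rc, row.length = (rc.headD []).length) ∧
    ((rc.length = 1 ∧ 3 ≤ (rc.headD []).length) → ∀ op ∈ operations, op = "ShiftRow")
instance (rc : List (List Int)) (operations : List String) : Decidable (Pre_solution rc operations) := by
  unfold Pre_solution; infer_instance

def pvWitness_solution : List (List Int) × List String := ([[1, 2], [3, 4]], ["ShiftRow", "Rotate"])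

-- On single-column matrices (C = 1, outside the problem's guaranteed shape) A returns rows widened to
-- length 2, its two column deques both holding the lone column; B keeps every row at length 1, which is
-- the intended, shape-preserving behaviour.
def D_solution (rc : List (List Int)) (operations : List String) : Prop :=
  rc ≠ [] ∧ (rc.headD []).length = 1
instance (rc : List (List Int)) (operations : List String) : Decidable (D_solution rc operations) := by
  unfold D_solution; infer_instance

def Spec_solution (rc : List (List Int)) (operations : List String) (out : List (List Int)) : Prop :=
  ¬ D_solution rc operations → out = solution_alt rc operations
instance (rc : List (List Int)) (operations : List String) (out : List (List Int)) : Decidable (Spec_solution rc operations out) := by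
  unfold Spec_solution; infer_instance

def pvDiffWitness_solution : List (List Int) × List String := ([[1], [2]], ["Rotate"])
def pvDiffWitnessOut_solution : (List (List Int)) × (List (List Int)) := ([[2, 1], [2, 1]], [[2], [1]])

-- ===== CLAIM (what is proved, stated in full; the proofs are below) =====
def Claim_unchanged_solution : Prop := ∀ (rc : List (List Int)) (operations : List String), Dom_solution rc operations → Pre_solution rc operations → Spec_solution rc operations (solution rc operations)
def Claim_changed_solution : Prop := Dom_solution (pvDiffWitness_solution.1) (pvDiffWitness_solution.2) ∧ Pre_solution (pvDiffWitness_solution.1) (pvDiffWitness_solution.2) ∧ D_solution (pvDiffWitness_solution.1) (pvDiffWitness_solution.2) ∧ solution (pvDiffWitness_solution.1) (pvDiffWitness_solution.2) = pvDiffWitnessOut_solution.1 ∧ solution_alt (pvDiffWitness_solution.1) (pvDiffWitness_solution.2) = pvDiffWitnessOut_solution.2 ∧ pvDiffWitnessOut_solution.1 ≠ pvDiffWitnessOut_solution.2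
def Claim_exact_solution : Prop := ∀ (rc : List (List Int)) (operations : List String), Dom_solution rc operations → Pre_solution rc operations → D_solution rc operations → solution rc operations ≠ solution_alt rc operations

-- ===== LEMMAS AND PROOFS =====

-- ---- generic helpers ----
theorem pvGetElem?_foldl_modify {α : Type} (f : Nat → α → α) :
    ∀ (is : List Nat) (xs : List α) (j : Nat), is.Nodup →
      ((is.foldl (fun acc i => acc.modify i (f i)) xs)[j]? =
        if j ∈ is then xs[j]?.map (f j) else xs[j]?)
  | [], xs, j, _ => by simp
  | i :: is, xs, j, h => by
    simp only [List.foldl_cons]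
    rw [pvGetElem?_foldl_modify f is _ j (List.Nodup.of_cons h)]
    have hi : i ∉ is := (List.nodup_cons.mp h).1
    by_cases hj : j ∈ is
    · have hne : i ≠ j := fun e => hi (e ▸ hj)
      simp [hj, hne]
    · by_cases hji : j = i
      · subst hji
        simp [hj]
      · have hne : i ≠ j := fun e => hji e.symm
        simp [hj, hne, hji]

theorem pvLength_foldl_modify {α : Type} (f : Nat → α → α) :
    ∀ (is : List Nat) (xs : List α),
      (is.foldl (fun acc i => acc.modify i (f i)) xs).length = xs.length
  | [], _ => rfl
  | i :: is, xs => by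
    simp only [List.foldl_cons]
    rw [pvLength_foldl_modify f is _, List.length_modify]

theorem pvGetElem?_eq_some_getD {α : Type} (l : List α) (d : α) (j : Nat) (h : j < l.length) :
    l[j]? = some (l.getD j d) := by
  simp [List.getD_eq_getElem?_getD, List.getElem?_eq_getElem h]

-- ---- the column view of a matrix (A's deque state) ----
def pvHead (row : List Int) : Int := row.headD 0
def pvLast (row : List Int) : Int := row.getLastD 0
def pvMid (C : Nat) (row : List Int) : List Int := (row.drop 1).take (C - 2)
def encL (m : List (List Int)) : List Int := m.map pvHead
def encR (m : List (List Int)) : List Int := m.map pvLast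
def encM (C : Nat) (m : List (List Int)) : List (List Int) := m.map (pvMid C)

theorem pvHead_eq_getD (row : List Int) : pvHead row = row.getD 0 0 := by
  cases row <;> simp [pvHead]

theorem pvLast_eq_getD (row : List Int) (C : Nat) (h : row.length = C) (hC : 1 ≤ C) :
    pvLast row = row.getD (C - 1) 0 := by
  simp [pvLast, List.getLastD_eq_getLast?, List.getLast?_eq_getElem?, List.getD_eq_getElem?_getD, h]

theorem pvGetLastD_eq_getD {α : Type} (m : List α) (d : α) (h : m ≠ []) :
    m.getLastD d = m.getD (m.length - 1) d := by
  simp [List.getLastD_eq_getLast?, List.getLast?_eq_getElem?, List.getD_eq_getElem?_getD]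

-- rows of the rotated matrix, by index (the rotation branch of stepB, R ≥ 2)
theorem stepB_rot_getElem? (C : Nat) (m : List (List Int)) (op : String)
    (hop : ¬ op = "ShiftRow") (hR : 2 ≤ m.length) (j : Nat) :
    (stepB m.length C m op)[j]? =
      if j = 0 then
        m[0]?.map (fun row => ((row.take 1 ++ (m.headD []).take (C - 1)).set 0
          ((m.getD 1 []).getD 0 0)))
      else if j = m.length - 1 then
        m[j]?.map (fun row => ((m.getD (m.length - 1) []).drop 1).take (C - 1) ++
          ((row.set (C - 1) ((m.getD (m.length - 1 - 1) []).getD (C - 1) 0)).drop (C - 1)))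
      else
        m[j]?.map (fun row => ((row.set (C - 1) ((m.getD (j - 1) []).getD (C - 1) 0)).set 0
          ((m.getD (j + 1) []).getD 0 0))) := by
  unfold stepB
  rw [if_neg hop]
  rw [pvGetElem?_foldl_modify _ _ _ _ List.nodup_range]
  rw [List.getElem?_modify]
  rw [pvGetElem?_foldl_modify _ _ _ _ (List.nodup_range' 1)]
  rw [List.getElem?_modify]
  simp only [List.mem_range, List.mem_range'_1]
  by_cases h0 : j = 0
  · subst h0
    cases hm : m[0]? <;>
      simp [hm, show (0:Nat) < m.length - 1 by omega,
        show ¬ (m.length - 1 = 0) by omega,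
        show ¬ (1 ≤ 0 ∧ 0 < 1 + (m.length - 1)) by omega]
  · by_cases hlast : j = m.length - 1
    · subst hlast
      cases hm : m[m.length - 1]? <;>
        simp [hm, show ¬ (m.length - 1 < m.length - 1) by omega,
          show (1 ≤ m.length - 1 ∧ m.length - 1 < 1 + (m.length - 1)) by omega,
          show ¬ (0 = m.length - 1) by omega, h0]
    · by_cases hmid : j < m.length - 1
      · cases hm : m[j]? <;>
          simp [hm, hmid, h0, hlast, show (1 ≤ j ∧ j < 1 + (m.length - 1)) by omega,
            show ¬ (m.length - 1 = j) by omega,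
            show ¬ (0 = j) by omega]
      · have hm : m[j]? = none := by
          simp [List.getElem?_eq_none_iff]; omega
        simp [hm, hmid, h0, hlast, show ¬ (1 ≤ j ∧ j < 1 + (m.length - 1)) by omega,
          show ¬ (m.length - 1 = j) by omega, show ¬ (0 = j) by omega]

-- ---- small row-level facts ----
theorem pvHeadD_eq_getD {α : Type} (m : List α) (d : α) : m.headD d = m.getD 0 d := by
  cases m <;> simp

theorem pvSet_zero_head (l : List Int) (w : Int) (h : l ≠ []) : pvHead (l.set 0 w) = w := by
  cases l with
  | nil => simp at h
  | cons a t => simp [pvHead]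

theorem pvTake_one_append_set (l X : List Int) (w : Int) (h : l ≠ []) :
    (l.take 1 ++ X).set 0 w = w :: X := by
  cases l with
  | nil => simp at h
  | cons a t => simp

theorem pvDropSet (l : List Int) (C : Nat) (v : Int) (h : l.length = C) (hC : 1 ≤ C) :
    (l.set (C - 1) v).drop (C - 1) = [v] := by
  apply List.ext_getElem?
  intro k
  simp only [List.getElem?_drop, List.getElem?_set]
  rcases k with _ | k
  · simp [show C - 1 < l.length by omega]
  · have h1 : ¬ (C - 1 = C - 1 + (k + 1)) := by omega
    rw [if_neg h1]
    simp [List.getElem?_eq_none_iff]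
    omega

-- length and membership facts about stepB
theorem stepB_length (R C : Nat) (m : List (List Int)) (op : String) (h : m ≠ []) :
    (stepB R C m op).length = m.length := by
  unfold stepB
  by_cases hop : op = "ShiftRow"
  · rw [if_pos hop]
    simp [List.length_dropLast]
    cases m with
    | nil => simp at h
    | cons a t => simp
  · rw [if_neg hop]
    rw [pvLength_foldl_modify, List.length_modify, pvLength_foldl_modify, List.length_modify]

theorem pvRectGetD (m : List (List Int)) (C : Nat) (rect : ∀ row ∈ m, row.length = C)
    (j : Nat) (h : j < m.length) : (m.getD j []).length = C := by
  apply rect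
  rw [List.getD_eq_getElem?_getD, List.getElem?_eq_getElem h]
  exact List.getElem_mem h

-- ---- row-level computations ----
theorem pvLast_cons (x : Int) (X : List Int) (h : X ≠ []) : pvLast (x :: X) = pvLast X := by
  cases X with
  | nil => simp at h
  | cons b t => simp [pvLast]

theorem pvLast_take : ∀ (l : List Int) (k : Nat), k < l.length → pvLast (l.take (k + 1)) = l.getD k 0
  | [], k, h => by simp at h
  | a :: t, 0, _ => by simp [pvLast]
  | a :: t, k + 1, h => by
    simp only [List.take_succ_cons]
    rw [pvLast_cons a _ (by
      apply List.ne_nil_of_length_pos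
      rw [List.length_take]
      have hk : k < t.length := by simpa using Nat.lt_of_succ_lt_succ h
      omega)]
    rw [pvLast_take t k (by simpa using Nat.lt_of_succ_lt_succ h)]
    simp

theorem pvHead_lastrow (row : List Int) (C : Nat) (hlen : row.length = C) (hC : 2 ≤ C)
    (X : List Int) : pvHead ((row.drop 1).take (C - 1) ++ X) = row.getD 1 0 := by
  cases row with
  | nil => exfalso; simp at hlen; omega
  | cons a t =>
    cases t with
    | nil => exfalso; simp at hlen; omega
    | cons b t' =>
      have h1 : C - 1 = (C - 2) + 1 := by omega
      rw [h1]
      simp [pvHead]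

theorem pvLast_row0 (row : List Int) (C : Nat) (hlen : row.length = C) (hC : 2 ≤ C) (w : Int) :
    pvLast ((row.take 1 ++ row.take (C - 1)).set 0 w) = row.getD (C - 2) 0 := by
  have hne : row ≠ [] := by intro e; rw [e] at hlen; simp at hlen; omega
  rw [pvTake_one_append_set _ _ _ hne]
  rw [pvLast_cons _ _ (by
    intro e
    have := congrArg List.length e
    simp [hlen] at this
    omega)]
  have h1 : C - 1 = (C - 2) + 1 := by omega
  rw [h1, pvLast_take row (C - 2) (by omega)]

theorem pvLast_setset (row : List Int) (C : Nat) (hlen : row.length = C) (hC : 2 ≤ C)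
    (v w : Int) : pvLast ((row.set (C - 1) v).set 0 w) = v := by
  rw [pvLast_eq_getD _ C (by simp [hlen]) (by omega)]
  rw [List.getD_eq_getElem?_getD]
  rw [List.getElem?_set]
  rw [if_neg (by omega : ¬ (0 = C - 1))]
  rw [List.getElem?_set]
  rw [if_pos rfl]
  rw [if_pos (show C - 1 < row.length by omega)]
  simp

theorem pvMid_setset (row : List Int) (C : Nat) (hlen : row.length = C) (hC : 2 ≤ C)
    (v w : Int) : pvMid C ((row.set (C - 1) v).set 0 w) = pvMid C row := by
  apply List.ext_getElem?
  intro k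
  simp only [pvMid, List.getElem?_take, List.getElem?_drop, List.getElem?_set]
  by_cases hk : k < C - 2
  · rw [if_pos hk, if_pos hk, if_neg (show ¬ ((0:Nat) = 1 + k) by omega),
      if_neg (show ¬ (C - 1 = 1 + k) by omega)]
  · rw [if_neg hk, if_neg hk]

theorem pvTake_eq_cons_dropLast (row : List Int) (C : Nat) (hlen : row.length = C) (hC : 3 ≤ C) :
    row.take (C - 2) = row.getD 0 0 :: (pvMid C row).dropLast := by
  apply List.ext_getElem?
  intro k
  rcases k with _ | k
  · rw [List.getElem?_take, if_pos (show 0 < C - 2 by omega), List.getElem?_cons_zero,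
      pvGetElem?_eq_some_getD row 0 0 (by omega)]
  · simp only [List.getElem?_take, List.getElem?_cons_succ, List.getElem?_dropLast,
      pvMid, List.length_take, List.length_drop, List.getElem?_drop, hlen]
    by_cases hk : k + 1 < C - 2
    · rw [if_pos hk, if_pos (by omega), if_pos (by omega)]
      rw [show 1 + k = k + 1 by omega]
    · rw [if_neg hk, if_neg (by omega)]

theorem pvMid_lastrow (row : List Int) (C : Nat) (hlen : row.length = C) (hC : 3 ≤ C) (v : Int) :
    pvMid C ((row.drop 1).take (C - 1) ++ [v]) =
      (pvMid C row).tail ++ [row.getD (C - 1) 0] := by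
  unfold pvMid
  rw [List.drop_append_of_le_length (by simp [hlen]; omega)]
  rw [List.take_append_of_le_length (by simp [hlen]; omega)]
  rw [List.drop_take, List.take_take]
  rw [← List.drop_one (l := (row.drop 1).take (C - 2))]
  rw [List.drop_take]
  simp only [List.drop_drop]
  rw [show (C - 2) ⊓ (C - 1 - 1) = (C - 2 - 1) + 1 by omega]
  rw [List.take_add_one]
  congr 1
  rw [List.getElem?_drop]
  rw [pvGetElem?_eq_some_getD row 0 (1 + 1 + (C - 2 - 1)) (by omega)]
  rw [show 1 + 1 + (C - 2 - 1) = C - 1 by omega]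
  simp

theorem pvLast_pvMid (row : List Int) (C : Nat) (hlen : row.length = C) (hC : 3 ≤ C) :
    pvLast (pvMid C row) = row.getD (C - 2) 0 := by
  unfold pvMid
  rw [show C - 2 = (C - 3) + 1 by omega, pvLast_take _ _ (by simp [hlen]; omega)]
  simp only [List.getD_eq_getElem?_getD, List.getElem?_drop]
  rw [show 1 + (C - 3) = C - 3 + 1 by omega]

theorem pvHead_pvMid (row : List Int) (C : Nat) (hlen : row.length = C) (hC : 3 ≤ C) :
    pvHead (pvMid C row) = row.getD 1 0 := by
  cases row with
  | nil => exfalso; simp at hlen; omega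
  | cons a t =>
    cases t with
    | nil => exfalso; simp at hlen; omega
    | cons b t' =>
      unfold pvMid
      rw [show C - 2 = (C - 3) + 1 by omega]
      simp [pvHead]

theorem pvMid_ne_nil (row : List Int) (C : Nat) (hlen : row.length = C) (hC : 3 ≤ C) :
    pvMid C row ≠ [] := by
  intro e
  have := congrArg List.length e
  simp [pvMid, hlen] at this
  omega

-- left column of the rotated matrix: it shifts up, the bottom slot taking rc[R-1][1]
theorem encL_stepB_rot (C : Nat) (m : List (List Int)) (op : String)
    (hop : ¬ op = "ShiftRow") (hC : 2 ≤ C) (hR : 2 ≤ m.length)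
    (rect : ∀ row ∈ m, row.length = C) :
    encL (stepB m.length C m op) = (encL m).tail ++ [(m.getD (m.length - 1) []).getD 1 0] := by
  apply List.ext_getElem?
  intro j
  simp only [encL, List.getElem?_map]
  rw [stepB_rot_getElem? C m op hop hR j]
  simp only [List.getElem?_append, List.getElem?_tail, List.getElem?_map,
    List.length_tail, List.length_map]
  by_cases h0 : j = 0
  · subst h0
    rw [if_pos (by omega : 0 < m.length - 1), if_pos rfl]
    rw [pvGetElem?_eq_some_getD m [] 0 (by omega), pvGetElem?_eq_some_getD m [] 1 (by omega)]
    have hlen : (m.getD 0 []).length = C := pvRectGetD m C rect 0 (by omega)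
    have hne : (m.getD 0 []) ≠ [] := by intro e; rw [e] at hlen; simp at hlen; omega
    simp only [Option.map_some]
    rw [pvHeadD_eq_getD, pvTake_one_append_set _ _ _ hne]
    simp [pvHead, List.head?_eq_getElem?]
  · by_cases hlast : j = m.length - 1
    · subst hlast
      rw [if_neg (by omega : ¬ m.length - 1 < m.length - 1), if_neg h0, if_pos rfl]
      rw [pvGetElem?_eq_some_getD m [] _ (by omega)]
      simp only [Nat.sub_self, Option.map_some, List.getElem?_cons_zero]
      congr 1
      exact pvHead_lastrow _ C (pvRectGetD m C rect _ (by omega)) hC _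
    · by_cases hmid : j < m.length - 1
      · rw [if_pos hmid, if_neg h0, if_neg hlast]
        rw [pvGetElem?_eq_some_getD m [] j (by omega), pvGetElem?_eq_some_getD m [] (j+1) (by omega)]
        simp only [Option.map_some]
        congr 1
        have hlen : (m.getD j []).length = C := pvRectGetD m C rect j (by omega)
        rw [pvSet_zero_head _ _ (by
          apply List.ne_nil_of_length_pos
          rw [List.length_set, hlen]
          omega)]
        rw [pvHead_eq_getD]
      · rw [if_neg hmid, if_neg h0, if_neg hlast]
        have hm : m[j]? = none := by simp [List.getElem?_eq_none_iff]; omega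
        rw [hm]
        simp only [Option.map_none]
        rw [List.getElem?_singleton]
        rw [if_neg (by omega : ¬ j - (m.length - 1) = 0)]

-- right column of the rotated matrix: it shifts down, the top slot taking rc[0][C-2]
theorem encR_stepB_rot (C : Nat) (m : List (List Int)) (op : String)
    (hop : ¬ op = "ShiftRow") (hC : 2 ≤ C) (hR : 2 ≤ m.length)
    (rect : ∀ row ∈ m, row.length = C) :
    encR (stepB m.length C m op) = (m.getD 0 []).getD (C - 2) 0 :: (encR m).dropLast := by
  apply List.ext_getElem?
  intro j
  simp only [encR, List.getElem?_map]
  rw [stepB_rot_getElem? C m op hop hR j]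
  rcases j with _ | j
  · rw [if_pos rfl, List.getElem?_cons_zero]
    rw [pvGetElem?_eq_some_getD m [] 0 (by omega)]
    simp only [Option.map_some]
    congr 1
    rw [pvHeadD_eq_getD]
    exact pvLast_row0 _ C (pvRectGetD m C rect 0 (by omega)) hC _
  · rw [if_neg (by omega : ¬ (j + 1 = 0)), List.getElem?_cons_succ]
    simp only [List.getElem?_dropLast, List.getElem?_map, List.length_map]
    by_cases hlast : j + 1 = m.length - 1
    · rw [if_pos hlast]
      rw [pvGetElem?_eq_some_getD m [] _ (by omega), pvGetElem?_eq_some_getD m [] j (by omega)]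
      simp only [Option.map_some]
      congr 1
      have hlen : (m.getD (j+1) []).length = C := pvRectGetD m C rect _ (by omega)
      rw [pvDropSet _ C _ hlen (by omega)]
      rw [show m.length - 1 - 1 = j by omega]
      rw [pvLast, List.getLastD_concat]
      rw [pvLast_eq_getD _ C (pvRectGetD m C rect j (by omega)) (by omega)]
      rw [if_pos (by omega : j < m.length - 1)]
    · by_cases hmid : j + 1 < m.length - 1
      · rw [if_neg hlast, if_pos (by omega : j < m.length - 1)]
        rw [pvGetElem?_eq_some_getD m [] _ (by omega), pvGetElem?_eq_some_getD m [] j (by omega)]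
        simp only [Option.map_some]
        congr 1
        have hlen : (m.getD (j+1) []).length = C := pvRectGetD m C rect _ (by omega)
        rw [pvLast_setset _ C hlen hC]
        rw [show j + 1 - 1 = j by omega]
        rw [pvLast_eq_getD _ C (pvRectGetD m C rect j (by omega)) (by omega)]
      · rw [if_neg hlast, if_neg (by omega : ¬ j < m.length - 1)]
        have hm : m[j+1]? = none := by simp [List.getElem?_eq_none_iff]; omega
        rw [hm]
        simp

-- middle block of the rotated matrix (C ≥ 3)
theorem encM_stepB_rot (C : Nat) (m : List (List Int)) (op : String)
    (hop : ¬ op = "ShiftRow") (hC : 3 ≤ C) (hR : 2 ≤ m.length)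
    (rect : ∀ row ∈ m, row.length = C) :
    encM C (stepB m.length C m op) =
      ((m.getD 0 []).getD 0 0 :: (pvMid C (m.getD 0 [])).dropLast) ::
        ((encM C m).tail.dropLast ++
          [(pvMid C (m.getD (m.length - 1) [])).tail ++ [(m.getD (m.length - 1) []).getD (C - 1) 0]]) := by
  apply List.ext_getElem?
  intro j
  simp only [encM, List.getElem?_map]
  rw [stepB_rot_getElem? C m op hop hR j]
  rcases j with _ | j
  · rw [if_pos rfl, List.getElem?_cons_zero]
    rw [pvGetElem?_eq_some_getD m [] 0 (by omega)]
    simp only [Option.map_some]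
    congr 1
    have hlen : (m.getD 0 []).length = C := pvRectGetD m C rect 0 (by omega)
    have hne : (m.getD 0 []) ≠ [] := by intro e; rw [e] at hlen; simp at hlen; omega
    rw [pvHeadD_eq_getD, pvTake_one_append_set _ _ _ hne]
    rw [← pvTake_eq_cons_dropLast _ C hlen hC]
    simp only [pvMid, List.drop_succ_cons, List.drop_zero]
    rw [List.take_take]
    congr 1
    omega
  · rw [if_neg (by omega : ¬ (j + 1 = 0)), List.getElem?_cons_succ]
    simp only [List.getElem?_append, List.getElem?_dropLast, List.getElem?_tail,
      List.getElem?_map, List.length_dropLast, List.length_tail, List.length_map]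
    by_cases hlast : j + 1 = m.length - 1
    · rw [if_pos hlast]
      have e1 : m.length - 1 = j + 1 := hlast.symm
      rw [e1, show j + 1 - 1 = j by omega]
      rw [if_neg (by omega : ¬ j < j), show j - j = 0 by omega]
      simp only [List.getElem?_cons_zero]
      rw [pvGetElem?_eq_some_getD m [] _ (by omega)]
      simp only [Option.map_some]
      congr 1
      have hlen : (m.getD (j+1) []).length = C := pvRectGetD m C rect _ (by omega)
      rw [pvDropSet _ C _ hlen (by omega)]
      exact pvMid_lastrow _ C hlen hC _
    · by_cases hmid : j + 1 < m.length - 1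
      · rw [if_neg hlast, if_pos (by omega : j < m.length - 1 - 1),
          if_pos (by omega : j < m.length - 1 - 1)]
        rw [pvGetElem?_eq_some_getD m [] (j+1) (by omega)]
        simp only [Option.map_some]
        congr 1
        have hlen : (m.getD (j+1) []).length = C := pvRectGetD m C rect _ (by omega)
        exact pvMid_setset _ C hlen (by omega) _ _
      · rw [if_neg hlast, if_neg (by omega : ¬ j < m.length - 1 - 1)]
        have hm : m[j+1]? = none := by simp [List.getElem?_eq_none_iff]; omega
        rw [hm]
        rw [show j - (m.length - 1 - 1) = (j - (m.length - 2)) by omega]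
        simp
        omega

-- ---- generic head/last/tail conversion helpers ----
theorem pvMapHeadD {α β : Type} (f : α → β) (m : List α) (d : β) (e : α) (h : m ≠ []) :
    (m.map f).headD d = f (m.getD 0 e) := by
  cases m with
  | nil => simp at h
  | cons a t => simp

theorem pvMapGetLastD {α β : Type} (f : α → β) (m : List α) (d : β) (e : α) (h : m ≠ []) :
    (m.map f).getLastD d = f (m.getD (m.length - 1) e) := by
  rw [List.getLastD_eq_getLast?, List.getLast?_map, List.getLast?_eq_getElem?]
  rw [pvGetElem?_eq_some_getD m e (m.length - 1) (by
    cases m with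
    | nil => simp at h
    | cons a t => simp)]
  simp

theorem pvTailGetD {α : Type} (l : List α) (k : Nat) (d : α) :
    l.tail.getD k d = l.getD (k + 1) d := by
  simp [List.getD_eq_getElem?_getD, List.getElem?_tail]

theorem pvHeadD_append {α : Type} (l X : List α) (d : α) (h : l ≠ []) :
    (l ++ X).headD d = l.headD d := by
  cases l with
  | nil => simp at h
  | cons a t => simp

theorem pvGetLastD_cons {α : Type} (x : α) (X : List α) (d : α) (h : X ≠ []) :
    (x :: X).getLastD d = X.getLastD d := by
  cases X with
  | nil => simp at h
  | cons b t => simp [List.getLastD_eq_getLast?]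

theorem pvDropLast_cons {α : Type} (x : α) (X : List α) (h : X ≠ []) :
    (x :: X).dropLast = x :: X.dropLast := by
  cases X with
  | nil => simp at h
  | cons b t => simp

theorem pvTail_append {α : Type} (l X : List α) (h : l ≠ []) :
    (l ++ X).tail = l.tail ++ X := by
  cases l with
  | nil => simp at h
  | cons a t => simp

theorem pvGetLastD_mem {α : Type} (l : List α) (d : α) (h : l ≠ []) : l.getLastD d ∈ l := by
  rw [List.getLastD_eq_getLast?, List.getLast?_eq_some_getLast h]
  simp [List.getLast_mem]

-- A's rotation step, expressed on the column view
theorem stepA_rot (C : Nat) (m : List (List Int)) (op : String)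
    (hop : ¬ op = "ShiftRow") (hC : 2 ≤ C) (hR : 1 ≤ m.length)
    (hR2 : 3 ≤ C → 2 ≤ m.length)
    (rect : ∀ row ∈ m, row.length = C) :
    stepA C (encL m, encR m, encM C m) op =
      ((encL m).tail ++ [(m.getD (m.length - 1) []).getD 1 0],
       (m.getD 0 []).getD (C - 2) 0 :: (encR m).dropLast,
       if 3 ≤ C then
         ((m.getD 0 []).getD 0 0 :: (pvMid C (m.getD 0 [])).dropLast) ::
           ((encM C m).tail.dropLast ++
             [(pvMid C (m.getD (m.length - 1) [])).tail ++ [(m.getD (m.length - 1) []).getD (C - 1) 0]])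
       else encM C m) := by
  have hm : m ≠ [] := by intro e; rw [e] at hR; simp at hR
  have hL : List.map pvHead m ≠ [] := by simp [hm]
  have hRn : List.map pvLast m ≠ [] := by simp [hm]
  have hlen0 : (m.getD 0 []).length = C := pvRectGetD m C rect 0 (by omega)
  have hlenl : (m.getD (m.length - 1) []).length = C := pvRectGetD m C rect _ (by omega)
  by_cases h3 : 3 ≤ C
  · rw [if_pos h3]
    simp only [stepA, dqPop, dqPopL]
    rw [if_neg hop, if_pos h3]
    simp only [encL, encR, encM]
    rw [pvMapHeadD (pvMid C) m default [] hm]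
    rw [← List.map_tail]
    rw [pvMapGetLastD (pvMid C) m.tail default [] (by
      have h2 : 2 ≤ m.length := hR2 h3
      intro e; have := congrArg List.length e; simp at this; omega)]
    rw [List.length_tail, pvTailGetD]
    rw [show m.length - 1 - 1 + 1 = m.length - 1 by omega]
    rw [show (pvMid C (m.getD 0 [])).getLastD (default : Int) = pvLast (pvMid C (m.getD 0 [])) from rfl]
    rw [pvLast_pvMid _ C hlen0 h3]
    rw [pvGetLastD_cons _ _ _ hRn]
    rw [show (List.map pvLast m).getLastD (default : Int) = (List.map pvLast m).getLastD 0 from rfl]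
    rw [pvMapGetLastD pvLast m 0 [] hm]
    rw [pvLast_eq_getD _ C hlenl (by omega)]
    rw [pvHeadD_append _ _ _ (pvMid_ne_nil _ C hlenl h3)]
    rw [show (pvMid C (m.getD (m.length - 1) [])).headD (default : Int) = pvHead (pvMid C (m.getD (m.length - 1) [])) from rfl]
    rw [pvHead_pvMid _ C hlenl h3]
    rw [pvHeadD_append _ _ _ hL]
    rw [show (List.map pvHead m).headD (default : Int) = pvHead (m.getD 0 []) from
      pvMapHeadD pvHead m 0 [] hm]
    rw [pvHead_eq_getD]
    rw [pvTail_append _ _ hL, pvTail_append _ _ (pvMid_ne_nil _ C hlenl h3)]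
    rw [pvDropLast_cons _ _ hRn]
    rfl
  · rw [if_neg h3]
    simp only [stepA, dqPop, dqPopL]
    rw [if_neg hop, if_neg h3]
    simp only [encL, encR, encM]
    rw [show (List.map pvHead m).headD (default : Int) = pvHead (m.getD 0 []) from
      pvMapHeadD pvHead m 0 [] hm]
    rw [pvGetLastD_cons _ _ _ hRn]
    rw [show (List.map pvLast m).getLastD (default : Int) = (List.map pvLast m).getLastD 0 from rfl]
    rw [pvMapGetLastD pvLast m 0 [] hm]
    rw [pvLast_eq_getD _ C hlenl (by omega)]
    rw [pvDropLast_cons _ _ hRn]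
    rw [pvHead_eq_getD]
    rw [show (C - 1 : Nat) = 1 by omega, show (C - 2 : Nat) = 0 by omega]

-- 'ShiftRow' commutes with the column view
theorem step_shift (C : Nat) (m : List (List Int)) (h : m ≠ []) :
    stepA C (encL m, encR m, encM C m) "ShiftRow" =
      (encL (m.getLastD [] :: m.dropLast), encR (m.getLastD [] :: m.dropLast),
        encM C (m.getLastD [] :: m.dropLast)) := by
  have e1 : (List.map pvHead m).getLastD (default : Int) = pvHead (m.getLastD []) := by
    rw [pvMapGetLastD pvHead m default [] h, pvGetLastD_eq_getD m [] h]
  have e2 : (List.map pvLast m).getLastD (default : Int) = pvLast (m.getLastD []) := by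
    rw [pvMapGetLastD pvLast m default [] h, pvGetLastD_eq_getD m [] h]
  have e3 : (List.map (pvMid C) m).getLastD (default : List Int) = pvMid C (m.getLastD []) := by
    rw [pvMapGetLastD (pvMid C) m default [] h, pvGetLastD_eq_getD m [] h]
  simp only [stepA, dqPop, encL, encR, encM, List.map_cons, if_true]
  rw [e1, e2, e3, ← List.map_dropLast, ← List.map_dropLast, ← List.map_dropLast]

-- with two columns there is no middle block: every slice is []
theorem encM_two (m : List (List Int)) : encM 2 m = List.replicate m.length [] := by
  induction m with
  | nil => rfl
  | cons a t ih => simp [encM, pvMid, List.replicate_succ] at ih ⊢; exact ih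

-- stepB keeps the matrix rectangular
theorem stepB_rect (C : Nat) (m : List (List Int)) (op : String) (hC : 1 ≤ C)
    (hR : 1 ≤ m.length) (rect : ∀ row ∈ m, row.length = C) :
    ∀ row ∈ stepB m.length C m op, row.length = C := by
  have hm : m ≠ [] := by intro e; rw [e] at hR; simp at hR
  by_cases hop : op = "ShiftRow"
  · subst hop
    simp only [stepB, if_pos rfl]
    intro row hrow
    rcases List.mem_cons.mp hrow with h | h
    · exact h ▸ rect _ (pvGetLastD_mem m [] hm)
    · exact rect _ (List.dropLast_subset m h)
  · by_cases hR2 : 2 ≤ m.length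
    · intro row hrow
      rw [List.mem_iff_getElem?] at hrow
      obtain ⟨j, hj⟩ := hrow
      rw [stepB_rot_getElem? C m op hop hR2 j] at hj
      split_ifs at hj with h0 hlast
      · rw [pvGetElem?_eq_some_getD m [] 0 (by omega)] at hj
        simp only [Option.map_some, Option.some.injEq] at hj
        have hl0 : (m.getD 0 []).length = C := pvRectGetD m C rect 0 (by omega)
        have hh : (m.headD []).length = C := by rw [pvHeadD_eq_getD]; exact hl0
        rw [← hj]
        simp only [List.length_set, List.length_append, List.length_take, hl0, hh]
        omega
      · have hjlt : j < m.length := by omega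
        rw [pvGetElem?_eq_some_getD m [] j hjlt] at hj
        simp only [Option.map_some, Option.some.injEq] at hj
        have hlj : (m.getD j []).length = C := pvRectGetD m C rect j hjlt
        have hll : (m.getD (m.length - 1) []).length = C := pvRectGetD m C rect _ (by omega)
        rw [← hj]
        simp only [List.length_append, List.length_take, List.length_drop, List.length_set,
          hlj, hll]
        omega
      · have hjlt : j < m.length := by
          rcases Nat.lt_or_ge j m.length with h | h
          · exact h
          · rw [List.getElem?_eq_none_iff.mpr (by omega)] at hj; simp at hj
        rw [pvGetElem?_eq_some_getD m [] j hjlt] at hj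
        simp only [Option.map_some, Option.some.injEq] at hj
        have hlj : (m.getD j []).length = C := pvRectGetD m C rect j hjlt
        rw [← hj]
        simp only [List.length_set]
        exact hlj
    · have h1 : m.length = 1 := by omega
      match m, h1 with
      | [r0], _ =>
        have hl0 : r0.length = C := rect r0 (by simp)
        intro row hrow
        simp only [stepB, if_neg hop, List.length_singleton, Nat.sub_self,
          List.range_zero, List.range'_zero, List.foldl_nil, List.modify_zero_cons] at hrow
        simp only [List.mem_singleton] at hrow
        have hh : ([r0].headD []).length = C := by simp [hl0]
        rw [hrow]
        simp only [List.length_append, List.length_take, List.length_drop, List.length_set,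
          List.getD_eq_getElem?_getD]
        simp [hl0]
        omega

-- one operation commutes with the column view
theorem step_comm (C : Nat) (m : List (List Int)) (op : String) (hC : 2 ≤ C)
    (hR : 1 ≤ m.length) (hRC : ¬ op = "ShiftRow" → 3 ≤ C → 2 ≤ m.length)
    (rect : ∀ row ∈ m, row.length = C) :
    stepA C (encL m, encR m, encM C m) op =
      (encL (stepB m.length C m op), encR (stepB m.length C m op),
        encM C (stepB m.length C m op)) := by
  have hm : m ≠ [] := by intro e; rw [e] at hR; simp at hR
  by_cases hop : op = "ShiftRow"
  · subst hop
    rw [show stepB m.length C m "ShiftRow" = m.getLastD [] :: m.dropLast from by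
      simp [stepB]]
    exact step_shift C m hm
  · by_cases hR2 : 2 ≤ m.length
    · rw [stepA_rot C m op hop hC hR (fun _ => hR2) rect]
      by_cases h3 : 3 ≤ C
      · rw [if_pos h3]
        rw [encL_stepB_rot C m op hop hC hR2 rect, encR_stepB_rot C m op hop hC hR2 rect,
          encM_stepB_rot C m op hop h3 hR2 rect]
      · have hc2 : C = 2 := by omega
        subst hc2
        rw [if_neg h3]
        rw [encL_stepB_rot 2 m op hop hC hR2 rect, encR_stepB_rot 2 m op hop hC hR2 rect]
        rw [encM_two, encM_two, stepB_length _ _ _ _ hm]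
    · have h1 : m.length = 1 := by omega
      have hc2 : C = 2 := by
        by_contra hne
        have h3 : 3 ≤ C := by omega
        exact absurd (hRC hop h3) (by omega)
      subst hc2
      match m, h1 with
      | [row], _ =>
        have hrow : row.length = 2 := rect row (by simp)
        match row, hrow with
        | [a, b], _ =>
          simp [stepA, stepB, dqPop, dqPopL, hop, encL, encR, encM, pvHead, pvLast, pvMid,
            List.modify_zero_cons, List.range_zero, List.range'_zero, Nat.sub_self]

-- the whole operation loop commutes with the column view
theorem fold_comm (C R : Nat) (hC : 2 ≤ C) :
    ∀ (ops : List String) (m : List (List Int)), m.length = R → 1 ≤ R →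
      (∀ row ∈ m, row.length = C) →
      ((R = 1 ∧ 3 ≤ C) → ∀ op ∈ ops, op = "ShiftRow") →
      ops.foldl (stepA C) (encL m, encR m, encM C m) =
        (encL (ops.foldl (stepB R C) m), encR (ops.foldl (stepB R C) m),
          encM C (ops.foldl (stepB R C) m)) ∧
        (ops.foldl (stepB R C) m).length = R ∧
        (∀ row ∈ ops.foldl (stepB R C) m, row.length = C)
  | [], m, hlen, _, rect, _ => ⟨rfl, hlen, rect⟩
  | op :: ops, m, hlen, h1, rect, hsp => by
    have hm : m ≠ [] := by intro e; rw [e] at hlen; simp at hlen; omega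
    have hRC : ¬ op = "ShiftRow" → 3 ≤ C → 2 ≤ m.length := by
      intro hop h3
      by_cases hR2 : 2 ≤ m.length
      · exact hR2
      · exact absurd (hsp ⟨by omega, h3⟩ op (by simp)) hop
    have hcomm := step_comm C m op hC (by omega) hRC rect
    rw [hlen] at hcomm
    have hlen' : (stepB R C m op).length = R := by
      have := stepB_length R C m op hm
      omega
    have rect' : ∀ row ∈ stepB R C m op, row.length = C := by
      have := stepB_rect C m op (by omega) (by omega) rect
      rw [hlen] at this
      exact this
    have ih := fold_comm C R hC ops (stepB R C m op) hlen' h1 rect'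
      (fun hx op' hop' => hsp hx op' (List.mem_cons_of_mem _ hop'))
    simp only [List.foldl_cons]
    rw [hcomm]
    exact ih

-- A's building loop produces exactly the column view
theorem build_eq (C : Nat) :
    ∀ (rc : List (List Int)) (abc : List Int × List Int × List (List Int)),
      rc.foldl (fun (st : List Int × List Int × List (List Int)) row =>
          (st.1 ++ [row.headD 0], st.2.1 ++ [row.getLastD 0],
            st.2.2 ++ [(row.drop 1).take (C - 2)])) abc =
        (abc.1 ++ encL rc, abc.2.1 ++ encR rc, abc.2.2 ++ encM C rc)
  | [], abc => by simp [encL, encR, encM]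
  | row :: rc, abc => by
    simp only [List.foldl_cons]
    rw [build_eq C rc _]
    simp [encL, encR, encM, pvHead, pvLast, pvMid]

-- A's final loop inverts the column view on a rectangular matrix
theorem rebuild_enc (C : Nat) (hC : 2 ≤ C) :
    ∀ (m : List (List Int)), (∀ row ∈ m, row.length = C) →
      rebuildA m.length (encL m) (encM C m) (encR m) = m
  | [], _ => rfl
  | row :: m, rect => by
    have hrow : row.length = C := rect row (by simp)
    have ih := rebuild_enc C hC m (fun r hr => rect r (List.mem_cons_of_mem _ hr))
    simp only [encL, encR, encM] at ih
    simp only [encL, encR, encM, List.map_cons, List.length_cons, rebuildA,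
      List.headD_cons, List.tail_cons]
    rw [ih]
    congr 1
    cases row with
    | nil => exfalso; simp at hrow; omega
    | cons a t =>
      have ht : t ≠ [] := by
        intro e; rw [e] at hrow; simp at hrow; omega
      simp only [pvHead, List.headD_cons, pvMid, List.drop_succ_cons, List.drop_zero,
        List.cons.injEq, true_and]
      rw [show C - 2 = t.length - 1 by simp at hrow; omega]
      rw [← List.dropLast_eq_take]
      rw [pvLast, pvGetLastD_cons _ _ _ ht, List.getLastD_eq_getLast?,
        List.getLast?_eq_some_getLast ht]
      simp only [Option.getD_some]
      exact List.dropLast_append_getLast ht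

-- the matrix stays rectangular through B's whole loop
theorem foldB_rect (C R : Nat) (hC : 1 ≤ C) :
    ∀ (ops : List String) (m : List (List Int)), m.length = R → 1 ≤ R →
      (∀ row ∈ m, row.length = C) →
      (ops.foldl (stepB R C) m).length = R ∧
        (∀ row ∈ ops.foldl (stepB R C) m, row.length = C)
  | [], m, hlen, _, rect => ⟨hlen, rect⟩
  | op :: ops, m, hlen, h1, rect => by
    have hm : m ≠ [] := by intro e; rw [e] at hlen; simp at hlen; omega
    have hlen' : (stepB R C m op).length = R := by
      have := stepB_length R C m op hm; omega
    have rect' : ∀ row ∈ stepB R C m op, row.length = C := by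
      have := stepB_rect C m op hC (by omega) rect
      rw [hlen] at this
      exact this
    simpa only [List.foldl_cons] using foldB_rect C R hC ops (stepB R C m op) hlen' h1 rect'

-- the two implementations agree on rectangular matrices with at least two columns
theorem solution_eq (rc : List (List Int)) (ops : List String)
    (hne : rc ≠ []) (hC2 : 2 ≤ (rc.headD []).length)
    (rect : ∀ row ∈ rc, row.length = (rc.headD []).length)
    (hsp : (rc.length = 1 ∧ 3 ≤ (rc.headD []).length) → ∀ op ∈ ops, op = "ShiftRow") :
    solution rc ops = solution_alt rc ops := by
  have h1 : 1 ≤ rc.length := by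
    cases rc with
    | nil => simp at hne
    | cons a t => simp
  obtain ⟨hfold, hlen, rect'⟩ :=
    fold_comm (rc.headD []).length rc.length hC2 ops rc rfl h1 rect hsp
  unfold solution solution_alt
  simp only []
  rw [build_eq (rc.headD []).length rc ([], [], [])]
  simp only [List.nil_append]
  rw [hfold]
  simp only []
  generalize hM : List.foldl (stepB rc.length (rc.headD []).length) rc ops = M
  rw [hM] at hlen rect'
  rw [← hlen]
  exact rebuild_enc (rc.headD []).length hC2 M rect'

-- A's final loop always produces rows of length ≥ 2
theorem rebuildA_shape (n : Nat) (l : List Int) (mid : List (List Int)) (r : List Int) :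
    ∃ row rest, rebuildA (n + 1) l mid r = row :: rest ∧ 2 ≤ row.length := by
  refine ⟨_, _, rfl, ?_⟩
  simp only [List.length_cons, List.length_append, List.length_singleton]
  omega

-- ===== VERDICT (by name: the statement is the Claim_ definition above) =====
theorem solution_spec : Claim_unchanged_solution := by
  intro rc ops _ hpre hnd
  obtain ⟨hne, hc1, rect, hsp⟩ := hpre
  have hC2 : 2 ≤ (rc.headD []).length := by
    by_contra h
    exact hnd ⟨hne, by omega⟩
  exact solution_eq rc ops hne hC2 rect hsp

theorem solution_changed : Claim_changed_solution := by unfold Claim_changed_solution; decide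

theorem solution_tight : Claim_exact_solution := by
  intro rc ops _ hpre hd heq
  obtain ⟨hne, hc1, rect, hsp⟩ := hpre
  obtain ⟨-, hC1⟩ := hd
  have h1 : 1 ≤ rc.length := by
    cases rc with
    | nil => simp at hne
    | cons a t => simp
  obtain ⟨hlen, rect'⟩ := foldB_rect (rc.headD []).length rc.length (by omega) ops rc rfl h1 rect
  have hB : solution_alt rc ops =
      List.foldl (stepB rc.length (rc.headD []).length) rc ops := rfl
  cases hR : rc.length with
  | zero => omega
  | succ n =>
    have hsol : solution rc ops =
        rebuildA rc.length
          (ops.foldl (stepA (rc.headD []).length)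
            (rc.foldl (fun (st : List Int × List Int × List (List Int)) row =>
              (st.1 ++ [row.headD 0], st.2.1 ++ [row.getLastD 0],
                st.2.2 ++ [(row.drop 1).take ((rc.headD []).length - 2)])) ([], [], []))).1
          (ops.foldl (stepA (rc.headD []).length)
            (rc.foldl (fun (st : List Int × List Int × List (List Int)) row =>
              (st.1 ++ [row.headD 0], st.2.1 ++ [row.getLastD 0],
                st.2.2 ++ [(row.drop 1).take ((rc.headD []).length - 2)])) ([], [], []))).2.2
          (ops.foldl (stepA (rc.headD []).length)
            (rc.foldl (fun (st : List Int × List Int × List (List Int)) row =>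
              (st.1 ++ [row.headD 0], st.2.1 ++ [row.getLastD 0],
                st.2.2 ++ [(row.drop 1).take ((rc.headD []).length - 2)])) ([], [], []))).2.1 := rfl
    rw [hR] at hsol
    obtain ⟨rowA, restA, hshape, h2⟩ := rebuildA_shape n _ _ _
    rw [hshape] at hsol
    have hBlen : (solution_alt rc ops).length = rc.length := by rw [hB]; exact hlen
    cases hM : solution_alt rc ops with
    | nil => rw [hM] at hBlen; rw [hR] at hBlen; simp at hBlen
    | cons b0 M' =>
      have hb0 : b0.length = (rc.headD []).length := by
        apply rect'
        rw [hB] at hM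
        rw [hM]
        simp
      rw [hsol, hM] at heq
      have hhead : rowA = b0 := (List.cons.injEq _ _ _ _ ▸ heq).1
      rw [← hhead] at hb0
      omega
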